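-- pv_equiv track=rewrite | github.com/44r0nqtp2t43vr/FreeAI | modules/validators.py | validate_L2_06
-- ===== SOURCE A (Python) =====
-- def validate_L2_06(statement_type, tags_list):
--     varname_indices = [index for index in range(len(tags_list)) if tags_list[index][1] == 'var_name']
--     equals_indices = [index for index in range(len(tags_list)) if tags_list[index][1] == '=']
--     number_indices = [index for index in range(len(tags_list)) if tags_list[index][1] == 'number']
--     function_indices = [index for index in range(len(tags_list)) if tags_list[index][1] == 'function_name']
--     if statement_type == 'conditional' and (len(equals_indices) == 2 and (len(varname_indices) == 1 and (len(number_indices) == 1 and len(function_indices) == 1))):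
--         if tags_list[0][1] == 'if' and (equals_indices[1] - equals_indices[0] == 1 and tags_list[number_indices[0]][0] == '1'):
--             if tags_list[varname_indices[0]][0] == 'turn' and tags_list[function_indices[0]][0] == 'usewateroid':
--                 return True
--     return False
-- ===== SOURCE B (Python) =====
-- def validate_L2_06(statement_type, tags_list):
--     cv = ce = cn = cf = 0
--     v = n = f = ''
--     first_eq = last_eq = -1
--     for i, (value, tag) in enumerate(tags_list):
--         if tag == 'var_name':
--             cv += 1
--             v = value
--         elif tag == '=':
--             if ce == 0:
--                 first_eq = i
--             last_eq = i
--             ce += 1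
--         elif tag == 'number':
--             cn += 1
--             n = value
--         elif tag == 'function_name':
--             cf += 1
--             f = value
--     return (statement_type == 'conditional' and ce == 2 and cv == 1
--             and cn == 1 and cf == 1 and tags_list[0][1] == 'if'
--             and last_eq - first_eq == 1 and n == '1'
--             and v == 'turn' and f == 'usewateroid')
-- ===== Notes on version B (the rewrite author's own statement) =====
-- stated objective: alternative
-- what changed: A builds four index lists by separate range-scans and then re-indexes the tag list; B does a single pass over enumerate(tags_list) accumulating counts, last-seen values and the first/last '=' positions, and checks the grammar pattern from that summary.
import Mathlib
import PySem

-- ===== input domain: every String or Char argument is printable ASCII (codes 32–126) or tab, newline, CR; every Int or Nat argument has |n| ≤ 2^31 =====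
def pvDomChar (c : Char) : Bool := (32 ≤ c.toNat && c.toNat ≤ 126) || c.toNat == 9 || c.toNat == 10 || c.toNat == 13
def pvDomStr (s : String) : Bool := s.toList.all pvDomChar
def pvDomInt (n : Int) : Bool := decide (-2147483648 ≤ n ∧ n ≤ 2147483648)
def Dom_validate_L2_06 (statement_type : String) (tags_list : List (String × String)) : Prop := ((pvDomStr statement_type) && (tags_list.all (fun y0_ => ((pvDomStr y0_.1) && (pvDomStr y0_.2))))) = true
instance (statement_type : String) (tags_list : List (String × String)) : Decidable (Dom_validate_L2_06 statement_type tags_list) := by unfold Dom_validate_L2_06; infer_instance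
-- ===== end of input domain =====

-- B replaces A's four index-list comprehensions and index lookups by a single pass that
-- accumulates counts, last-seen values and the first/last '=' positions (objective: alternative).

-- ===== PORT A =====
-- [index for index in range(len(tags_list)) if tags_list[index][1] == tag]
def pvIdxs (tags_list : List (String × String)) (tag : String) : List Int :=
  (PySem.List.pyRange 0 tags_list.length 1).filter
    (fun i => ((PySem.List.pyGet? tags_list i).map Prod.snd) == some tag)

def validate_L2_06 (statement_type : String) (tags_list : List (String × String)) : Bool :=
  let varname_indices := pvIdxs tags_list "var_name"
  let equals_indices := pvIdxs tags_list "="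
  let number_indices := pvIdxs tags_list "number"
  let function_indices := pvIdxs tags_list "function_name"
  if statement_type == "conditional" && (equals_indices.length == 2 && (varname_indices.length == 1 && (number_indices.length == 1 && function_indices.length == 1))) then
    if ((PySem.List.pyGet? tags_list 0).map Prod.snd == some "if") &&
       ((PySem.List.pyGetD equals_indices 1 0 - PySem.List.pyGetD equals_indices 0 0 == 1) &&
        ((PySem.List.pyGet? tags_list (PySem.List.pyGetD number_indices 0 0)).map Prod.fst == some "1")) then
      if ((PySem.List.pyGet? tags_list (PySem.List.pyGetD varname_indices 0 0)).map Prod.fst == some "turn") &&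
         ((PySem.List.pyGet? tags_list (PySem.List.pyGetD function_indices 0 0)).map Prod.fst == some "usewateroid") then
        true
      else false
    else false
  else false

-- ===== PORT B =====
structure PvSt where
  cv : Nat
  ce : Nat
  cn : Nat
  cf : Nat
  v : String
  n : String
  f : String
  fe : Int
  le : Int
deriving DecidableEq, Repr

def pvStep (s : PvSt) (p : Int × (String × String)) : PvSt :=
  if p.2.2 == "var_name" then { s with cv := s.cv + 1, v := p.2.1 }
  else if p.2.2 == "=" then
    { s with ce := s.ce + 1, fe := if s.ce == 0 then p.1 else s.fe, le := p.1 }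
  else if p.2.2 == "number" then { s with cn := s.cn + 1, n := p.2.1 }
  else if p.2.2 == "function_name" then { s with cf := s.cf + 1, f := p.2.1 }
  else s

def pvInit : PvSt := ⟨0, 0, 0, 0, "", "", "", -1, -1⟩

def validate_L2_06_alt (statement_type : String) (tags_list : List (String × String)) : Bool :=
  let s := (PySem.List.enumerate tags_list 0).foldl pvStep pvInit
  statement_type == "conditional" && s.ce == 2 && s.cv == 1 && s.cn == 1 && s.cf == 1 &&
    ((PySem.List.pyGet? tags_list 0).map Prod.snd == some "if") &&
    (s.le - s.fe == 1) && s.n == "1" && s.v == "turn" && s.f == "usewateroid"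

-- ===== PRECONDITION & SPEC =====
def Spec_validate_L2_06 (statement_type : String) (tags_list : List (String × String)) (out : Bool) : Prop := out = validate_L2_06_alt statement_type tags_list
instance (statement_type : String) (tags_list : List (String × String)) (out : Bool) : Decidable (Spec_validate_L2_06 statement_type tags_list out) := by unfold Spec_validate_L2_06; infer_instance

-- ===== CLAIM (what is proved, stated in full; the proofs are below) =====
def Claim_equal_validate_L2_06 : Prop := ∀ (statement_type : String) (tags_list : List (String × String)), Dom_validate_L2_06 statement_type tags_list → Spec_validate_L2_06 statement_type tags_list (validate_L2_06 statement_type tags_list)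

-- ===== LEMMAS AND PROOFS =====

-- occurrences of a tag: (index, value) pairs, indices starting at k
def pvOcc (t : String) (k : Int) : List (String × String) → List (Int × String)
  | [] => []
  | (v, g) :: xs => if g == t then (k, v) :: pvOcc t (k + 1) xs else pvOcc t (k + 1) xs

def pvLastD (d : String) (l : List String) : String := l.foldl (fun _ x => x) d
def pvLastI (d : Int) (l : List Int) : Int := l.foldl (fun _ x => x) d

theorem pvOcc_shift (t : String) (k : Int) (l : List (String × String)) :
    pvOcc t (k + 1) l = (pvOcc t k l).map (fun p => (p.1 + 1, p.2)) := by
  induction l generalizing k with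
  | nil => simp [pvOcc]
  | cons x xs ih =>
    obtain ⟨v, g⟩ := x
    by_cases h : (g == t) = true <;> simp [pvOcc, h, ih]

theorem pvIdxs_eq (tags : List (String × String)) (t : String) :
    pvIdxs tags t = (pvOcc t 0 tags).map Prod.fst := by
  induction tags with
  | nil => simp [pvIdxs, pvOcc]
  | cons x xs ih =>
    obtain ⟨v, g⟩ := x
    have hrange : PySem.List.pyRange 0 ((v, g) :: xs).length 1 =
        0 :: (PySem.List.pyRange 0 xs.length 1).map (· + 1) := by
      rw [PySem.List.pyRange_one_cons (by simp)]
      simp only [PySem.List.pyRange_one, List.map_map]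
      congr 1
      rw [show ((((v, g) :: xs).length : Int) - (0 + 1)).toNat = ((xs.length : Int) - 0).toNat from by simp]
      exact List.map_congr_left (fun a _ => by simp; omega)
    have hpred : ∀ i ∈ PySem.List.pyRange 0 (xs.length : Int) 1,
        ((fun i => ((PySem.List.pyGet? ((v, g) :: xs) i).map Prod.snd == some t)) ∘ (fun x => x + 1)) i =
        (fun i => ((PySem.List.pyGet? xs i).map Prod.snd == some t)) i := by
      intro i hi
      have h0 : 0 ≤ i := (PySem.List.mem_pyRange_one.mp hi).1
      obtain ⟨m, rfl⟩ : ∃ m : Nat, i = (m : Int) := ⟨i.toNat, by omega⟩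
      simp only [Function.comp_apply]
      rw [PySem.List.pyGet?_cons_succ]
    have htail : List.filter (fun i => ((PySem.List.pyGet? xs i).map Prod.snd == some t))
        (PySem.List.pyRange 0 (xs.length : Int) 1) = pvIdxs xs t := rfl
    have hshift : pvOcc t 1 xs = (pvOcc t 0 xs).map (fun p => (p.1 + 1, p.2)) := by
      simpa using pvOcc_shift t 0 xs
    unfold pvIdxs
    rw [hrange, List.filter_cons, List.filter_map, List.filter_congr hpred, htail, ih]
    by_cases h : g = t
    · subst h
      rw [if_pos (by simp)]
      simp [pvOcc, hshift, List.map_map, Function.comp]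
    · rw [if_neg (by simp [h])]
      simp [pvOcc, h, hshift, List.map_map, Function.comp]

theorem pvOcc_get (t : String) (l : List (String × String)) :
    ∀ p ∈ pvOcc t 0 l, 0 ≤ p.1 ∧ PySem.List.pyGet? l p.1 = some (p.2, t) := by
  induction l with
  | nil => simp [pvOcc]
  | cons x xs ih =>
    obtain ⟨v, g⟩ := x
    intro p hp
    have hshift : pvOcc t 1 xs = (pvOcc t 0 xs).map (fun p => (p.1 + 1, p.2)) := by
      simpa using pvOcc_shift t 0 xs
    have htail : ∀ q ∈ pvOcc t 0 xs,
        0 ≤ (q.1 + 1) ∧ PySem.List.pyGet? ((v, g) :: xs) (q.1 + 1) = some (q.2, t) := by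
      intro q hq
      obtain ⟨hq0, hqget⟩ := ih q hq
      obtain ⟨m, hm⟩ : ∃ m : Nat, q.1 = (m : Int) := ⟨q.1.toNat, by omega⟩
      refine ⟨by omega, ?_⟩
      rw [hm, PySem.List.pyGet?_cons_succ, ← hm, hqget]
    by_cases h : g = t
    · rw [show pvOcc t 0 ((v, g) :: xs) = (0, v) :: pvOcc t 1 xs from by simp [pvOcc, h]] at hp
      rcases List.mem_cons.mp hp with rfl | hp
      · exact ⟨le_refl 0, by simp [h]⟩
      · rw [hshift] at hp
        obtain ⟨q, hq, rfl⟩ := List.mem_map.mp hp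
        exact htail q hq
    · rw [show pvOcc t 0 ((v, g) :: xs) = pvOcc t 1 xs from by simp [pvOcc, h]] at hp
      rw [hshift] at hp
      obtain ⟨q, hq, rfl⟩ := List.mem_map.mp hp
      exact htail q hq

theorem pvFold_char (l : List (String × String)) : ∀ (k : Int) (s : PvSt),
    (PySem.List.enumerate l k).foldl pvStep s =
    { cv := s.cv + (pvOcc "var_name" k l).length,
      ce := s.ce + (pvOcc "=" k l).length,
      cn := s.cn + (pvOcc "number" k l).length,
      cf := s.cf + (pvOcc "function_name" k l).length,
      v := pvLastD s.v ((pvOcc "var_name" k l).map Prod.snd),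
      n := pvLastD s.n ((pvOcc "number" k l).map Prod.snd),
      f := pvLastD s.f ((pvOcc "function_name" k l).map Prod.snd),
      fe := if s.ce == 0 then ((pvOcc "=" k l).map Prod.fst).headD s.fe else s.fe,
      le := pvLastI s.le ((pvOcc "=" k l).map Prod.fst) } := by
  induction l with
  | nil => intro k s; simp [pvOcc, PySem.List.enumerate_nil, pvLastD, pvLastI]
  | cons x xs ih =>
    intro k s
    obtain ⟨v, g⟩ := x
    rw [PySem.List.enumerate_cons, List.foldl_cons, ih]
    by_cases h1 : g = "var_name"
    · subst h1
      simp [pvStep, pvOcc, pvLastD, pvLastI, PvSt.mk.injEq]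
      omega
    · by_cases h2 : g = "="
      · subst h2
        simp [pvStep, pvOcc, pvLastD, pvLastI, PvSt.mk.injEq]
        omega
      · by_cases h3 : g = "number"
        · subst h3
          simp [pvStep, pvOcc, pvLastD, pvLastI, PvSt.mk.injEq]
          omega
        · by_cases h4 : g = "function_name"
          · subst h4
            simp [pvStep, pvOcc, pvLastD, pvLastI, PvSt.mk.injEq]
            omega
          · simp [pvStep, pvOcc, pvLastD, pvLastI, h1, h2, h3, h4]

-- ===== VERDICT (by name: the statement is the Claim_ definition above) =====
theorem validate_L2_06_spec : Claim_equal_validate_L2_06 := by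
  intro st tags _
  unfold Spec_validate_L2_06
  unfold validate_L2_06 validate_L2_06_alt
  rw [pvIdxs_eq, pvIdxs_eq, pvIdxs_eq, pvIdxs_eq, pvFold_char]
  simp only [pvInit, List.length_map, Nat.zero_add]
  by_cases he : (pvOcc "=" 0 tags).length = 2
  · obtain ⟨p, q, hpq⟩ := List.length_eq_two.mp he
    by_cases hv : (pvOcc "var_name" 0 tags).length = 1
    · obtain ⟨a, ha⟩ := List.length_eq_one_iff.mp hv
      by_cases hn : (pvOcc "number" 0 tags).length = 1
      · obtain ⟨b, hb⟩ := List.length_eq_one_iff.mp hn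
        by_cases hf : (pvOcc "function_name" 0 tags).length = 1
        · obtain ⟨c, hc⟩ := List.length_eq_one_iff.mp hf
          have hga := (pvOcc_get "var_name" tags a (ha ▸ List.mem_singleton_self a)).2
          have hgb := (pvOcc_get "number" tags b (hb ▸ List.mem_singleton_self b)).2
          have hgc := (pvOcc_get "function_name" tags c (hc ▸ List.mem_singleton_self c)).2
          rw [hpq, ha, hb, hc]
          have g0 : ∀ (x : Int), PySem.List.pyGetD [x] 0 0 = x := fun _ => rfl
          have g20 : ∀ (x y : Int), PySem.List.pyGetD [x, y] 0 0 = x := fun _ _ => rfl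
          have g21 : ∀ (x y : Int), PySem.List.pyGetD [x, y] 1 0 = y := fun _ _ => rfl
          simp only [List.map_cons, List.map_nil, g0, g20, g21, hga, hgb, hgc,
            pvLastD, pvLastI, List.foldl_cons, List.foldl_nil, List.headD_cons,
            Option.map_some, List.length_cons, List.length_nil]
          cases hst : (st == "conditional") <;>
            cases hif : (Option.map Prod.snd (PySem.List.pyGet? tags 0) == some "if") <;>
              by_cases hd : q.1 - p.1 = 1 <;>
                by_cases h4 : b.2 = "1" <;>
                  by_cases h5 : a.2 = "turn" <;>
                    by_cases h6 : c.2 = "usewateroid" <;>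
                      simp_all
        · simp [hf]
      · simp [hn]
    · simp [hv]
  · simp [he]
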